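-- pv_equiv track=rewrite | github.com/153079019shariq/ATPG_Sequential | Gates.py | XOR_gate
-- ===== SOURCE A (Python) =====
-- def XOR_gate(list_input):
-- 	flag =0
-- 	count =0
-- 	for input1 in list_input:
-- 			if(input1=='x'):
-- 				return 'x'
-- 			else:
-- 				if(input1=='1'):
-- 					count =count +1
--
-- 	if(count % 2 !=0):					#Odd no of 1
-- 		return '1'
-- 	else:
-- 		return '0'
-- ===== SOURCE B (Python) =====
-- def XOR_gate(list_input):
--     # Fold back-to-front with a ternary symbolic state: normalize each element
--     # to '0'/'1'/'x' and combine it with the accumulated result via a 2-input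
--     # ternary XOR gate (order is immaterial since XOR is assoc./commutative).
--     out = '0'
--     for h in reversed(list_input):
--         a = '1' if h == '1' else ('x' if h == 'x' else '0')
--         if a == 'x' or out == 'x':
--             out = 'x'
--         else:
--             out = '1' if a != out else '0'
--     return out
-- ===== Notes on version B (the rewrite author's own statement) =====
-- stated objective: alternative
-- what changed: Replaces the iterative early-return loop with a '1'-counter by a back-to-front fold whose state is a ternary symbol: each element is normalized to 0/1/x and combined with the accumulator through a 2-input ternary XOR gate; no counter, early return or membership scan remains.
import Mathlib
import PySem

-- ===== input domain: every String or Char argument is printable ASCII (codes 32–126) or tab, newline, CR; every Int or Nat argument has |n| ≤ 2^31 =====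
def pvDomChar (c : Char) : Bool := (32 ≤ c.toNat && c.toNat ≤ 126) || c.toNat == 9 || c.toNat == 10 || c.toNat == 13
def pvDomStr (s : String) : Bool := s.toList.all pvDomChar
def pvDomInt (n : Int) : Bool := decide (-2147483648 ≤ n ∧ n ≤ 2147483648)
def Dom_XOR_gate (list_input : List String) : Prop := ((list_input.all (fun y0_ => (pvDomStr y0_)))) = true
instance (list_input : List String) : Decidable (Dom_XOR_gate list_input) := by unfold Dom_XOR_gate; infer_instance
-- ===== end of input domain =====

-- B replaces A's forward early-return loop with a '1'-counter by a back-to-front fold whose state is a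
-- ternary symbol combined through a 2-input XOR gate — objective: alternative.
-- ===== PORT A =====
-- loop with early return on 'x' and a running count of '1's
def XOR_gate_loop (l : List String) (count : Int) : String :=
  match l with
  | [] => if count % 2 ≠ 0 then "1" else "0"
  | input1 :: rest =>
      if input1 = "x" then "x"
      else if input1 = "1" then XOR_gate_loop rest (count + 1)
      else XOR_gate_loop rest count

def XOR_gate (list_input : List String) : String :=
  XOR_gate_loop list_input 0

-- ===== PORT B =====
-- back-to-front fold with a ternary symbolic state, combined via a 2-input ternary XOR gate
def xor2 (out h : String) : String :=
  let a := if h = "1" then "1" else if h = "x" then "x" else "0"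
  if a = "x" ∨ out = "x" then "x"
  else if a ≠ out then "1" else "0"

def XOR_gate_alt (list_input : List String) : String :=
  list_input.reverse.foldl xor2 "0"

-- ===== PRECONDITION & SPEC =====
def Spec_XOR_gate (list_input : List String) (out : String) : Prop := out = XOR_gate_alt list_input
instance (list_input : List String) (out : String) : Decidable (Spec_XOR_gate list_input out) := by unfold Spec_XOR_gate; infer_instance

-- ===== CLAIM =====
def Claim_equal_XOR_gate : Prop := ∀ (list_input : List String), Dom_XOR_gate list_input → Spec_XOR_gate list_input (XOR_gate list_input)

-- ===== LEMMAS AND PROOFS =====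
-- common characterisation: 'x' dominates, else parity of the number of "1"s
def xorChar (l : List String) : String :=
  if "x" ∈ l then "x"
  else if (l.filter (fun v => v = "1")).length % 2 = 1 then "1" else "0"

lemma foldr_xor2_eq (l : List String) : l.foldr (fun h out => xor2 out h) "0" = xorChar l := by
  induction l with
  | nil => simp [xorChar]
  | cons h t ih =>
    rw [List.foldr_cons, ih]
    by_cases hx : h = "x"
    · simp [xorChar, xor2, hx, List.mem_cons]
    · by_cases hmt : "x" ∈ t
      · simp [xorChar, xor2, hmt, List.mem_cons, Ne.symm hx]
      · by_cases h1 : h = "1"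
        · have hcnt : ((h :: t).filter (fun v => v = "1")).length
              = (t.filter (fun v => v = "1")).length + 1 := by simp [List.filter_cons, h1]
          by_cases hp : (t.filter (fun v => v = "1")).length % 2 = 1
          · have hpc : ¬ ((h :: t).filter (fun v => v = "1")).length % 2 = 1 := by omega
            simp [xorChar, xor2, hmt, hp, hpc, h1, Ne.symm hx]
            omega
          · have hpc : ((h :: t).filter (fun v => v = "1")).length % 2 = 1 := by omega
            simp [xorChar, xor2, hmt, hp, hpc, h1, Ne.symm hx]
            omega
        · have hcnt : ((h :: t).filter (fun v => v = "1")).length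
              = (t.filter (fun v => v = "1")).length := by simp [List.filter_cons, h1]
          by_cases hp : (t.filter (fun v => v = "1")).length % 2 = 1
          · have hpc : ((h :: t).filter (fun v => v = "1")).length % 2 = 1 := hcnt ▸ hp
            simp [xorChar, xor2, hmt, hp, hpc, h1, hx, Ne.symm hx]
          · have hpc : ¬ ((h :: t).filter (fun v => v = "1")).length % 2 = 1 := hcnt ▸ hp
            simp [xorChar, xor2, hmt, hp, hpc, h1, hx, Ne.symm hx]

lemma XOR_gate_loop_eq (l : List String) (c : Int) :
    XOR_gate_loop l c =
      if "x" ∈ l then "x"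
      else if (c + (l.filter (fun v => v = "1")).length) % 2 = 1 then "1" else "0" := by
  induction l generalizing c with
  | nil =>
    simp only [XOR_gate_loop, List.not_mem_nil, if_false, List.filter_nil,
      List.length_nil, Nat.cast_zero, add_zero]
    split_ifs <;> first | rfl | omega
  | cons h t ih =>
    by_cases hx : h = "x"
    · simp [XOR_gate_loop, hx]
    · by_cases h1 : h = "1"
      · have hcnt : ((h :: t).filter (fun v => v = "1")).length
            = (t.filter (fun v => v = "1")).length + 1 := by
          simp [List.filter_cons, h1]
        rw [show XOR_gate_loop (h :: t) c = XOR_gate_loop t (c + 1) by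
          simp [XOR_gate_loop, hx, h1], ih]
        by_cases hmt : "x" ∈ t
        · simp [hmt, Ne.symm hx]
        · simp only [hmt, if_false, List.mem_cons, Ne.symm hx, false_or, hcnt]
          split_ifs <;> first | rfl | (exfalso; push_cast at *; omega)
      · simp [XOR_gate_loop, hx, h1, ih, Ne.symm hx]

-- ===== VERDICT =====
theorem XOR_gate_spec : Claim_equal_XOR_gate := by
  intro l _
  unfold Spec_XOR_gate XOR_gate
  rw [XOR_gate_loop_eq]
  rw [show XOR_gate_alt l = l.foldr (fun h out => xor2 out h) "0" from List.foldl_reverse ..]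
  rw [foldr_xor2_eq]
  simp only [Int.zero_add, xorChar]
  by_cases hm : "x" ∈ l
  · simp [hm]
  · simp only [hm, if_false]
    split_ifs <;> first | rfl | (exfalso; omega)
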